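-- pv_equiv track=rewrite | github.com/BSB-publishing/bsb-align | mms_align_words.py | _map_word_idx_to_verse
-- ===== SOURCE A (Python) =====
-- def _map_word_idx_to_verse(word_idx, cleaned_verses):
--     """Map a flat word index to (verse_index, word_offset_in_verse)."""
--     pos = 0
--     for vi, verse in enumerate(cleaned_verses):
--         words = verse.split() if verse else []
--         if pos + len(words) > word_idx:
--             return vi, word_idx - pos
--         pos += len(words)
--     return len(cleaned_verses) - 1, 0
-- ===== SOURCE B (Python) =====
-- def _map_word_idx_to_verse(word_idx, cleaned_verses):
--     """Map a flat word index to (verse_index, word_offset_in_verse)."""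
--     # Phase 1: cumulative word counts per verse.
--     prefix = []
--     total = 0
--     for v in cleaned_verses:
--         total += len(v.split()) if v else 0
--         prefix.append(total)
--     # Phase 2: binary search for the first verse whose cumulative count exceeds word_idx.
--     lo, hi = 0, len(prefix)
--     while lo < hi:
--         mid = (lo + hi) // 2
--         if prefix[mid] <= word_idx:
--             lo = mid + 1
--         else:
--             hi = mid
--     if lo == len(prefix):
--         return len(cleaned_verses) - 1, 0
--     return lo, word_idx - (prefix[lo - 1] if lo else 0)
-- ===== Notes on version B (the rewrite author's own statement) =====
-- stated objective: alternative
-- what changed: Replaces the single linear scan with early return by a two-phase algorithm: build a cumulative prefix array of per-verse word counts, then binary-search it for the first verse whose cumulative count exceeds word_idx.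
import Mathlib
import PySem

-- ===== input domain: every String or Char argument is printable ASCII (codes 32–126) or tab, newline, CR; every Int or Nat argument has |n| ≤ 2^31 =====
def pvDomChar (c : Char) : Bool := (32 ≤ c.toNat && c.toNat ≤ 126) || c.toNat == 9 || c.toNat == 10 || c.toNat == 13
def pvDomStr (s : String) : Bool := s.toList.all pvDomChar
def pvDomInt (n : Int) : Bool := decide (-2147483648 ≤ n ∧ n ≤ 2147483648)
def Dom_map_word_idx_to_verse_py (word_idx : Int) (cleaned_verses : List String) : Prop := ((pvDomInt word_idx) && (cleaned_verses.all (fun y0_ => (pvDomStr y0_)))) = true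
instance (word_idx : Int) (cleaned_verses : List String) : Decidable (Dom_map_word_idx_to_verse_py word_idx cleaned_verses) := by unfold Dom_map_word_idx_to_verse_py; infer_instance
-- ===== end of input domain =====

-- B replaces A's linear scan with a prefix-sum array plus binary search (alternative decomposition).

-- ===== PORT A =====
-- words = verse.split() if verse else []
def pvWordCount (v : String) : Nat :=
  if v ≠ "" then (PySem.Str.split₀ v).length else 0

-- the 'for vi, verse in enumerate(...)' loop of A, state (vi, pos); n = len(cleaned_verses)
def pvA_loop (word_idx n : Int) : List String → Int → Int → Int × Int
  | [], _, _ => (n - 1, 0)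
  | v :: rest, vi, pos =>
    let words := pvWordCount v
    if pos + (words : Int) > word_idx then (vi, word_idx - pos)
    else pvA_loop word_idx n rest (vi + 1) (pos + (words : Int))

def map_word_idx_to_verse_py (word_idx : Int) (cleaned_verses : List String) : Int × Int :=
  pvA_loop word_idx (cleaned_verses.length : Int) cleaned_verses 0 0

-- ===== PORT B =====
-- Phase 1 of Source B: the cumulative prefix list, starting from running total t
def pvB_prefix : List String → Int → List Int
  | [], _ => []
  | v :: rest, t =>
    let t' := t + (pvWordCount v : Int)
    t' :: pvB_prefix rest t'

-- Phase 2 of Source B: the while-loop binary search (lo, hi are nonnegative list indices)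
def pvB_bsearch (p : List Int) (w : Int) (lo hi : Nat) : Nat :=
  if _h : lo < hi then
    let mid := (lo + hi) / 2
    if p.getD mid 0 ≤ w then pvB_bsearch p w (mid + 1) hi
    else pvB_bsearch p w lo mid
  else lo
termination_by hi - lo
decreasing_by all_goals omega

def map_word_idx_to_verse_py_alt (word_idx : Int) (cleaned_verses : List String) : Int × Int :=
  let pfx := pvB_prefix cleaned_verses 0
  let lo := pvB_bsearch pfx word_idx 0 pfx.length
  if lo = pfx.length then ((cleaned_verses.length : Int) - 1, 0)
  else ((lo : Int), word_idx - (if lo ≠ 0 then pfx.getD (lo - 1) 0 else 0))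

-- ===== PRECONDITION & SPEC =====
def Spec_map_word_idx_to_verse_py (word_idx : Int) (cleaned_verses : List String) (out : Int × Int) : Prop := out = map_word_idx_to_verse_py_alt word_idx cleaned_verses
instance (word_idx : Int) (cleaned_verses : List String) (out : Int × Int) : Decidable (Spec_map_word_idx_to_verse_py word_idx cleaned_verses out) := by unfold Spec_map_word_idx_to_verse_py; infer_instance

-- ===== CLAIM (what is proved, stated in full; the proofs are below) =====
def Claim_equal_map_word_idx_to_verse_py : Prop := ∀ (word_idx : Int) (cleaned_verses : List String), Dom_map_word_idx_to_verse_py word_idx cleaned_verses → Spec_map_word_idx_to_verse_py word_idx cleaned_verses (map_word_idx_to_verse_py word_idx cleaned_verses)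

-- ===== LEMMAS AND PROOFS =====

-- linCount w p = length of the initial run of elements ≤ w (for a sorted p: the
-- least index whose element exceeds w); the common characterisation of both sides
def linCount (w : Int) : List Int → Nat
  | [] => 0
  | x :: rest => if x ≤ w then linCount w rest + 1 else 0

theorem linCount_le_length (w : Int) (p : List Int) : linCount w p ≤ p.length := by
  induction p with
  | nil => simp [linCount]
  | cons x rest ih => simp only [linCount, List.length_cons]; split <;> omega

theorem linCount_lt (w : Int) (p : List Int) :
    ∀ i < linCount w p, p.getD i 0 ≤ w := by
  induction p with
  | nil => simp [linCount]
  | cons x rest ih =>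
    intro i hi
    simp only [linCount] at hi
    by_cases hx : x ≤ w
    · simp only [if_pos hx] at hi
      cases i with
      | zero => simpa using hx
      | succ j => simpa using ih j (by omega)
    · simp [if_neg hx] at hi

theorem linCount_unique (w : Int) (p : List Int) (r : Nat)
    (h1 : ∀ i < r, p.getD i 0 ≤ w)
    (h2 : ∀ i, r ≤ i → i < p.length → w < p.getD i 0)
    (h3 : r ≤ p.length) : r = linCount w p := by
  by_contra hne
  rcases Nat.lt_or_ge r (linCount w p) with h | h
  · have := linCount_lt w p r h
    have := h2 r le_rfl (lt_of_lt_of_le h (linCount_le_length w p))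
    omega
  · have hlt : linCount w p < r := by omega
    have := h1 (linCount w p) hlt
    -- element at linCount: p.getD (linCount) ≤ w but also definitionally > w
    have hx : linCount w p < p.length := lt_of_lt_of_le hlt h3
    -- from definition: by induction on p, element at linCount is > w when linCount < length
    have key : ∀ (q : List Int), linCount w q < q.length → w < q.getD (linCount w q) 0 := by
      intro q
      induction q with
      | nil => simp
      | cons x rest ih =>
        intro hq
        simp only [linCount] at hq ⊢
        by_cases hx' : x ≤ w
        · simp only [if_pos hx'] at hq ⊢
          simpa using ih (by simpa using hq)
        · simp [if_neg hx', lt_of_not_ge hx']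
    have := key p hx
    omega

-- the binary search computes linCount on a sorted list, given the loop invariant
theorem bsearch_eq_linCount (p : List Int) (w : Int) (hs : p.Pairwise (· ≤ ·)) :
    ∀ lo hi, lo ≤ hi → hi ≤ p.length →
    (∀ i < lo, p.getD i 0 ≤ w) → (∀ i, hi ≤ i → i < p.length → w < p.getD i 0) →
    pvB_bsearch p w lo hi = linCount w p := by
  have hmono : ∀ i j, i ≤ j → j < p.length → p.getD i 0 ≤ p.getD j 0 := by
    intro i j hij hj
    rcases Nat.eq_or_lt_of_le hij with rfl | hlt
    · exact le_rfl
    · have hi : i < p.length := lt_trans hlt hj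
      have h := (List.pairwise_iff_get.mp hs) ⟨i, hi⟩ ⟨j, hj⟩ hlt
      rw [List.getD_eq_getElem p 0 hi, List.getD_eq_getElem p 0 hj]
      simpa using h
  intro lo hi
  induction lo, hi using pvB_bsearch.induct p w with
  | case1 lo hi hlh mid hle ih =>
    intro _ hhi hlow hhigh
    rw [pvB_bsearch, dif_pos hlh, if_pos hle]
    exact ih (by omega) hhi
      (fun i hi' => hmono i mid (by omega) (by omega) |>.trans hle)
      hhigh
  | case2 lo hi hlh mid hgt ih =>
    intro hlo _ hlow hhigh
    rw [pvB_bsearch, dif_pos hlh, if_neg hgt]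
    exact ih (by omega) (by omega) hlow
      (fun i hi' hilen => lt_of_lt_of_le (lt_of_not_ge hgt) (hmono mid i hi' hilen))
  | case3 lo hi hlh =>
    intro hlo hhi hlow hhigh
    rw [pvB_bsearch, dif_neg hlh]
    exact linCount_unique w p lo hlow (fun i h1 h2 => hhigh i (by omega) h2) (by omega)

theorem pvB_prefix_length (cvs : List String) (t : Int) :
    (pvB_prefix cvs t).length = cvs.length := by
  induction cvs generalizing t with
  | nil => rfl
  | cons v rest ih => simp [pvB_prefix, ih]

theorem pvB_prefix_bounds (cvs : List String) (t : Int) :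
    (pvB_prefix cvs t).Pairwise (· ≤ ·) ∧ ∀ x ∈ pvB_prefix cvs t, t ≤ x := by
  induction cvs generalizing t with
  | nil => simp [pvB_prefix]
  | cons v rest ih =>
    have hc : (0 : Int) ≤ (pvWordCount v : Int) := Int.natCast_nonneg _
    rcases ih (t + (pvWordCount v : Int)) with ⟨hpw, hbd⟩
    refine ⟨List.pairwise_cons.mpr ⟨fun x hx => ?_, hpw⟩, ?_⟩
    · exact hbd x hx
    · intro x hx
      rcases List.mem_cons.mp hx with rfl | hx
      · omega
      · have := hbd x hx; omega

-- characterisation of A's loop in terms of the prefix list and linCount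
theorem pvA_loop_char (w n : Int) (cvs : List String) (vi pos : Int) :
    pvA_loop w n cvs vi pos =
      (if linCount w (pvB_prefix cvs pos) = (pvB_prefix cvs pos).length then (n - 1, 0)
       else (vi + (linCount w (pvB_prefix cvs pos) : Int),
             w - (if linCount w (pvB_prefix cvs pos) ≠ 0 then
                    (pvB_prefix cvs pos).getD (linCount w (pvB_prefix cvs pos) - 1) 0
                  else pos))) := by
  induction cvs generalizing vi pos with
  | nil => simp [pvA_loop, pvB_prefix, linCount]
  | cons v rest ih =>
    simp only [pvA_loop, pvB_prefix, linCount, List.length_cons]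
    by_cases hgt : pos + (pvWordCount v : Int) > w
    · have hle : ¬ (pos + (pvWordCount v : Int) ≤ w) := by omega
      simp [hgt, hle]
    · have hle : pos + (pvWordCount v : Int) ≤ w := by omega
      simp only [if_neg hgt, if_pos hle]
      rw [ih (vi + 1) (pos + (pvWordCount v : Int))]
      generalize pvB_prefix rest (pos + (pvWordCount v : Int)) = p'
      generalize linCount w p' = r'
      by_cases hend : r' = p'.length
      · simp [hend]
      · have h1 : r' + 1 ≠ p'.length + 1 := by omega
        simp only [if_neg hend, if_neg h1, Prod.mk.injEq]
        refine ⟨by push_cast; ring, ?_⟩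
        rcases r' with _ | j
        · simp
        · have hj : j + 1 ≠ 0 := by omega
          simp

-- ===== VERDICT (by name: the statement is the Claim_ definition above) =====
theorem map_word_idx_to_verse_py_spec : Claim_equal_map_word_idx_to_verse_py := by
  intro w cvs _
  unfold Spec_map_word_idx_to_verse_py map_word_idx_to_verse_py map_word_idx_to_verse_py_alt
  dsimp only
  rcases pvB_prefix_bounds cvs 0 with ⟨hpw, _⟩
  rw [pvA_loop_char,
    bsearch_eq_linCount (pvB_prefix cvs 0) w hpw 0 (pvB_prefix cvs 0).length
      (Nat.zero_le _) le_rfl (by omega) (by omega)]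
  simp only [pvB_prefix_length]
  split <;> simp
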